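-- pv_equiv track=rewrite | github.com/AiIsBetter/xunfei_competition_201809 | NFFM/1_pre_nffm_top_user_tags.py | gen_count_dict
-- ===== SOURCE A (Python) =====
-- def gen_count_dict(data, labels, begin, end):
--     total_dict = {}
--     pos_dict = {}
--     for i, d in enumerate(data):
--         if i >= begin and i < end:
--             continue
--         xs = d.split(',')
--         if '' in xs:
--             xs.remove('')
--         for x in xs:
--             if x not in total_dict.keys():
--                 total_dict[x] = 0
--             if x not in pos_dict.keys():
--                 pos_dict[x] = 0
--             total_dict[x] += 1
--             if labels[i] == 1:
--                 pos_dict[x] += 1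
--     return total_dict, pos_dict
-- ===== SOURCE B (Python) =====
-- def _tokens(d):
--     xs = d.split(',')
--     if '' in xs:
--         xs.remove('')
--     return xs
--
--
-- def gen_count_dict(data, labels, begin, end):
--     # pass 1: total frequency of every token in the rows outside [begin, end)
--     total_dict = {}
--     for i, d in enumerate(data):
--         if begin <= i < end:
--             continue
--         for x in _tokens(d):
--             total_dict[x] = total_dict.get(x, 0) + 1
--     # pass 2: frequencies counted only over rows whose label is 1
--     pos = {}
--     for i, d in enumerate(data):
--         if begin <= i < end:
--             continue
--         xs = _tokens(d)
--         if xs and labels[i] == 1: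
--             for x in xs:
--                 pos[x] = pos.get(x, 0) + 1
--     # pass 3: give pos_dict exactly total_dict's keys (and key order)
--     pos_dict = {k: pos.get(k, 0) for k in total_dict}
--     return total_dict, pos_dict
-- ===== Notes on version B (the rewrite author's own statement) =====
-- stated objective: alternative
-- what changed: Replaces A's single pass that interleaves membership tests and conditional increments on two dicts with three separate passes: a total-count pass, a label==1 count pass, and a final rebuild of pos_dict over total_dict's keys via pos.get(k, 0).
import Mathlib
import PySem

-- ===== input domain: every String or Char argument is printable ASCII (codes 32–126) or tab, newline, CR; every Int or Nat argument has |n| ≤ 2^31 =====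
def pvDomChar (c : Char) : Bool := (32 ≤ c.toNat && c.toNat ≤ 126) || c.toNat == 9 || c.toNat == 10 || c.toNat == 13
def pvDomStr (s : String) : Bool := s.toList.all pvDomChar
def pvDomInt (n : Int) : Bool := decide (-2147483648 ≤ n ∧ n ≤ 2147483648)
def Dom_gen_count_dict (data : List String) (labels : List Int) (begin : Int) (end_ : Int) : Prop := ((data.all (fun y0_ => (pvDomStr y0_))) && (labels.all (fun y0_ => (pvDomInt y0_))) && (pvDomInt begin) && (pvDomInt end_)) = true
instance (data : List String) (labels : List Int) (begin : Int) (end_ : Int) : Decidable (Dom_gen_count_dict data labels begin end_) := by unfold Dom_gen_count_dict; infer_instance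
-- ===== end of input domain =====

-- B re-implements A in three passes (total counts, label-1 counts, then pos_dict rebuilt over total's keys)
-- instead of A's single pass that maintains two dicts with membership tests; objective: alternative decomposition, same cost.

-- ===== PORT A =====
-- shared by both ports (Source B's _tokens has the same two lines A has inline):
-- xs = d.split(','); if '' in xs: xs.remove('')   (removes only the FIRST empty token)
def pvTokens (d : String) : List String :=
  let xs := (PySem.Str.split? d ",").getD []
  if xs.contains "" then (PySem.List.remove? xs "").getD xs else xs

-- body of A's inner 'for x in xs' loop, acting on the pair (total_dict, pos_dict)
def pvStepA (labels : List Int) (i : Int) (st : PySem.Dict String Int × PySem.Dict String Int)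
    (x : String) : PySem.Dict String Int × PySem.Dict String Int :=
  let total := if st.1.contains x then st.1 else st.1.insert x 0
  let pos := if st.2.contains x then st.2 else st.2.insert x 0
  let total := total.insert x (total.getD x 0 + 1)
  let pos := if PySem.List.pyGetD labels i 0 == 1 then pos.insert x (pos.getD x 0 + 1) else pos
  (total, pos)

def gen_count_dict (data : List String) (labels : List Int) (begin : Int) (end_ : Int) : (List (String × Int)) × (List (String × Int)) :=
  let st := (PySem.List.enumerate data).foldl
    (fun st p =>
      if begin ≤ p.1 ∧ p.1 < end_ then st
      else (pvTokens p.2).foldl (pvStepA labels p.1) st)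
    (PySem.Dict.empty, PySem.Dict.empty)
  (st.1.items, st.2.items)

-- ===== PORT B =====
-- 'for x in xs: d[x] = d.get(x, 0) + 1'
def pvCount (d : PySem.Dict String Int) (xs : List String) : PySem.Dict String Int :=
  xs.foldl (fun d x => d.insert x (d.getD x 0 + 1)) d

def gen_count_dict_alt (data : List String) (labels : List Int) (begin : Int) (end_ : Int) : (List (String × Int)) × (List (String × Int)) :=
  let total := (PySem.List.enumerate data).foldl
    (fun t p => if begin ≤ p.1 ∧ p.1 < end_ then t else pvCount t (pvTokens p.2))
    PySem.Dict.empty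
  let pos := (PySem.List.enumerate data).foldl
    (fun q p =>
      if begin ≤ p.1 ∧ p.1 < end_ then q
      else
        let xs := pvTokens p.2
        if xs ≠ [] ∧ PySem.List.pyGetD labels p.1 0 == 1 then pvCount q xs else q)
    PySem.Dict.empty
  (total.items, total.keys.map (fun k => (k, pos.getD k 0)))

-- ===== PRECONDITION & SPEC =====
-- Pre_ excludes exactly the inputs where Python A raises IndexError: a row outside [begin,end)
-- whose token list is nonempty (i.e. the row is not the empty string) but whose index has no label.
def Pre_gen_count_dict (data : List String) (labels : List Int) (begin : Int) (end_ : Int) : Prop :=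
  ∀ i : Nat, i < data.length → ¬ (begin ≤ (i : Int) ∧ (i : Int) < end_) →
    data.getD i "" ≠ "" → i < labels.length
instance (data : List String) (labels : List Int) (begin : Int) (end_ : Int) : Decidable (Pre_gen_count_dict data labels begin end_) := by unfold Pre_gen_count_dict; infer_instance

def pvWitness_gen_count_dict : List String × List Int × Int × Int :=
  (["a,b", "", "b,,a"], [1, 0, 1], 1, 2)

def Spec_gen_count_dict (data : List String) (labels : List Int) (begin : Int) (end_ : Int) (out : (List (String × Int)) × (List (String × Int))) : Prop := out = gen_count_dict_alt data labels begin end_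
instance (data : List String) (labels : List Int) (begin : Int) (end_ : Int) (out : (List (String × Int)) × (List (String × Int))) : Decidable (Spec_gen_count_dict data labels begin end_ out) := by unfold Spec_gen_count_dict; infer_instance

-- ===== CLAIM (what is proved, stated in full; the proofs are below) =====
def Claim_equal_gen_count_dict : Prop := ∀ (data : List String) (labels : List Int) (begin : Int) (end_ : Int), Dom_gen_count_dict data labels begin end_ → Pre_gen_count_dict data labels begin end_ → Spec_gen_count_dict data labels begin end_ (gen_count_dict data labels begin end_)

-- ===== LEMMAS AND PROOFS =====
-- B's counting step, named
def pvCnt (d : PySem.Dict String Int) (x : String) : PySem.Dict String Int :=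
  d.insert x (d.getD x 0 + 1)

-- A's pos_dict step for a single token, with the row's label test precomputed as b
def pvPosStep (b : Bool) (p : PySem.Dict String Int) (x : String) : PySem.Dict String Int :=
  if b then p.insert x (p.getD x 0 + 1) else (if p.contains x then p else p.insert x 0)

-- the invariant tying A's pos_dict (p) to B's total (t) and B's pos counter (q)
def pvInv (t p q : PySem.Dict String Int) : Prop :=
  p.keys = t.keys ∧ t.keys.Nodup ∧ ∀ k, p.getD k 0 = q.getD k 0

-- 'ensure key, then d[x] += 1' collapses to 'd[x] = d.get(x,0) + 1'
theorem pvEnsureIncr (d : PySem.Dict String Int) (x : String) :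
    (if d.contains x then d else d.insert x 0).insert x
      ((if d.contains x then d else d.insert x 0).getD x 0 + 1) = pvCnt d x := by
  by_cases h : d.contains x = true
  · simp [h, pvCnt]
  · simp only [Bool.not_eq_true] at h
    simp [h, pvCnt, PySem.Dict.insert_insert_self, PySem.Dict.getD_insert_self,
      PySem.Dict.getD_of_not_contains _ _ h]

theorem pvStepA_eq (labels : List Int) (i : Int) (st : PySem.Dict String Int × PySem.Dict String Int) (x : String) :
    pvStepA labels i st x = (pvCnt st.1 x, pvPosStep (PySem.List.pyGetD labels i 0 == 1) st.2 x) := by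
  unfold pvStepA pvPosStep
  simp only []
  rw [pvEnsureIncr st.1 x]
  by_cases hb : (PySem.List.pyGetD labels i 0 == 1) = true
  · simp only [hb, if_true]
    rw [pvEnsureIncr st.2 x]
    rfl
  · simp only [hb, Bool.false_eq_true, if_false]

theorem pvInv_step (t p q : PySem.Dict String Int) (b : Bool) (x : String) (h : pvInv t p q) :
    pvInv (pvCnt t x) (pvPosStep b p x) (if b then pvCnt q x else q) := by
  obtain ⟨hk, hn, hg⟩ := h
  have hc : p.contains x = t.contains x := by
    rw [PySem.Dict.contains_eq_decide_mem_keys, PySem.Dict.contains_eq_decide_mem_keys, hk]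
  cases b with
  | true =>
    refine ⟨?_, PySem.Dict.nodup_keys_insert _ _ _ hn, ?_⟩
    · simp only [pvCnt, pvPosStep, if_true]
      by_cases hx : t.contains x = true
      · rw [PySem.Dict.keys_insert_of_contains _ _ hx,
          PySem.Dict.keys_insert_of_contains _ _ (by rw [hc]; exact hx), hk]
      · simp only [Bool.not_eq_true] at hx
        rw [PySem.Dict.keys_insert_of_not_contains _ _ hx,
          PySem.Dict.keys_insert_of_not_contains _ _ (by rw [hc]; exact hx), hk]
    · intro k
      simp only [pvPosStep, if_true, pvCnt, PySem.Dict.getD_insert]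
      by_cases hkx : k = x <;> simp [hkx, hg]
  | false =>
    refine ⟨?_, PySem.Dict.nodup_keys_insert _ _ _ hn, ?_⟩
    · simp only [pvCnt, pvPosStep, Bool.false_eq_true, if_false]
      by_cases hx : t.contains x = true
      · rw [if_pos (by rw [hc]; exact hx), PySem.Dict.keys_insert_of_contains _ _ hx, hk]
      · simp only [Bool.not_eq_true] at hx
        rw [if_neg (by rw [hc, hx]; simp),
          PySem.Dict.keys_insert_of_not_contains _ _ hx,
          PySem.Dict.keys_insert_of_not_contains _ _ (by rw [hc]; exact hx), hk]
    · intro k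
      by_cases hpx : p.contains x = true
      · simp [pvPosStep, hpx, hg]
      · simp only [Bool.not_eq_true] at hpx
        simp only [pvPosStep, Bool.false_eq_true, if_false, hpx,
          PySem.Dict.getD_insert]
        by_cases hkx : k = x
        · subst hkx
          rw [if_pos rfl, ← hg k, PySem.Dict.getD_of_not_contains _ _ hpx]
        · simp [hkx, hg]

theorem pvInv_tok (xs : List String) (b : Bool) :
    ∀ t p q : PySem.Dict String Int, pvInv t p q →
    pvInv (xs.foldl pvCnt t) (xs.foldl (pvPosStep b) p) (if b then xs.foldl pvCnt q else q) := by
  induction xs with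
  | nil => intro t p q h; cases b <;> simpa using h
  | cons x xs ih =>
    intro t p q h
    have h' := pvInv_step t p q b x h
    cases b with
    | true => simpa using ih (pvCnt t x) (pvPosStep true p x) (pvCnt q x) (by simpa using h')
    | false => simpa using ih (pvCnt t x) (pvPosStep false p x) q (by simpa using h')

-- the 'xs ≠ []' guard in B's pos pass is immaterial for the fold
theorem pvGuard_eq (xs : List String) (b : Bool) (q : PySem.Dict String Int) :
    (if xs ≠ [] ∧ b = true then xs.foldl pvCnt q else q) = (if b then xs.foldl pvCnt q else q) := by
  cases xs <;> cases b <;> simp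

theorem pvInv_rows (begin end_ : Int) (lab : Int → Bool) (tok : String → List String) :
    ∀ (rows : List (Int × String)) (t p q : PySem.Dict String Int), pvInv t p q →
    pvInv (rows.foldl (fun t r => if begin ≤ r.1 ∧ r.1 < end_ then t else (tok r.2).foldl pvCnt t) t)
      (rows.foldl (fun p r => if begin ≤ r.1 ∧ r.1 < end_ then p else (tok r.2).foldl (pvPosStep (lab r.1)) p) p)
      (rows.foldl (fun q r => if begin ≤ r.1 ∧ r.1 < end_ then q
        else if tok r.2 ≠ [] ∧ lab r.1 = true then (tok r.2).foldl pvCnt q else q) q) := by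
  intro rows
  induction rows with
  | nil => intro t p q h; simpa using h
  | cons r rows ih =>
    intro t p q h
    simp only [List.foldl_cons]
    by_cases hs : begin ≤ r.1 ∧ r.1 < end_
    · simp only [if_pos hs]; exact ih t p q h
    · simp only [if_neg hs]
      rw [pvGuard_eq]
      exact ih _ _ _ (pvInv_tok (tok r.2) (lab r.1) t p q h)

theorem pvInv_empty : pvInv PySem.Dict.empty PySem.Dict.empty PySem.Dict.empty := by
  refine ⟨rfl, ?_, fun k => rfl⟩
  simp [PySem.Dict.keys_empty]

-- ===== VERDICT (by name: the statement is the Claim_ definition above) =====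
theorem gen_count_dict_spec : Claim_equal_gen_count_dict := by
  intro data labels begin end_ _ _
  unfold Spec_gen_count_dict gen_count_dict gen_count_dict_alt
  dsimp only
  have hsplit : (fun (st : PySem.Dict String Int × PySem.Dict String Int) (p : Int × String) =>
        if begin ≤ p.1 ∧ p.1 < end_ then st
        else (pvTokens p.2).foldl (pvStepA labels p.1) st)
      = (fun st r =>
        ((fun t (r : Int × String) => if begin ≤ r.1 ∧ r.1 < end_ then t
            else (pvTokens r.2).foldl pvCnt t) st.1 r,
         (fun p (r : Int × String) => if begin ≤ r.1 ∧ r.1 < end_ then p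
            else (pvTokens r.2).foldl (pvPosStep (PySem.List.pyGetD labels r.1 0 == 1)) p) st.2 r)) := by
    funext st r
    dsimp only
    by_cases hs : begin ≤ r.1 ∧ r.1 < end_
    · simp [hs]
    · simp only [if_neg hs]
      rw [show pvStepA labels r.1 = fun st x =>
            (pvCnt st.1 x, pvPosStep (PySem.List.pyGetD labels r.1 0 == 1) st.2 x) from
          funext fun st => funext fun x => pvStepA_eq labels r.1 st x,
        PySem.List.foldl_prod_mk]
  rw [hsplit,
    PySem.List.foldl_prod_mk
      (f := fun t (r : Int × String) => if begin ≤ r.1 ∧ r.1 < end_ then t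
          else (pvTokens r.2).foldl pvCnt t)
      (g := fun p (r : Int × String) => if begin ≤ r.1 ∧ r.1 < end_ then p
          else (pvTokens r.2).foldl (pvPosStep (PySem.List.pyGetD labels r.1 0 == 1)) p)]
  have hinv := pvInv_rows begin end_ (fun i => PySem.List.pyGetD labels i 0 == 1) pvTokens
    (PySem.List.enumerate data) PySem.Dict.empty PySem.Dict.empty PySem.Dict.empty pvInv_empty
  obtain ⟨hk, hn, hg⟩ := hinv
  have hcnt : ∀ (d : PySem.Dict String Int) xs, pvCount d xs = xs.foldl pvCnt d := fun _ _ => rfl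
  simp only [hcnt]
  refine Prod.ext rfl ?_
  dsimp only
  rw [PySem.Dict.items_eq_map_keys _ (by rw [hk]; exact hn) 0, hk]
  exact List.map_congr_left (fun k _ => by rw [hg k])
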